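-- pv_equiv track=rewrite | github.com/miliar/Code_Jam_Webscraper | solutions_python/solutions_year10_round2_nr1/140.py | solve
-- ===== SOURCE A (Python) =====
-- def solve(N, M):
--     _N=set()
--     for n in N:
--         path = [l for l in n.split('/') if l is not '']
--         for i in range(1, len(path)+1):
--             _N.add('/'.join(path[:i]))
--
--     _M=set()
--     for m in M:
--         path = [l for l in m.split('/') if l is not '']
--         for i in range(1, len(path)+1):
--             _M.add('/'.join(path[:i]))
--
--     _D = _M.difference(_N)
--     return len(_D)
-- ===== SOURCE B (Python) =====
-- def solve(N, M):
--     # One growing set + counter: seed it with every prefix of the existing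
--     # paths, then walk each needed path building the prefix string
--     # incrementally; count each prefix seen for the first time.
--     seen = set()
--     for n in N:
--         cur = ''
--         for p in n.split('/'):
--             if p == '':
--                 continue
--             cur = p if cur == '' else cur + '/' + p
--             seen.add(cur)
--     count = 0
--     for m in M:
--         cur = ''
--         for p in m.split('/'):
--             if p == '':
--                 continue
--             cur = p if cur == '' else cur + '/' + p
--             if cur not in seen:
--                 seen.add(cur)
--                 count += 1
--     return count
-- ===== Notes on version B (the rewrite author's own statement) =====
-- stated objective: faster
-- what changed: Replaces A's two prefix-sets built by joining every slice path[:i] and a final set.difference by a single growing seen-set with a counter: each path's prefix string is built incrementally while walking its components, and a needed prefix is counted exactly when it is first added.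
import Mathlib
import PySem

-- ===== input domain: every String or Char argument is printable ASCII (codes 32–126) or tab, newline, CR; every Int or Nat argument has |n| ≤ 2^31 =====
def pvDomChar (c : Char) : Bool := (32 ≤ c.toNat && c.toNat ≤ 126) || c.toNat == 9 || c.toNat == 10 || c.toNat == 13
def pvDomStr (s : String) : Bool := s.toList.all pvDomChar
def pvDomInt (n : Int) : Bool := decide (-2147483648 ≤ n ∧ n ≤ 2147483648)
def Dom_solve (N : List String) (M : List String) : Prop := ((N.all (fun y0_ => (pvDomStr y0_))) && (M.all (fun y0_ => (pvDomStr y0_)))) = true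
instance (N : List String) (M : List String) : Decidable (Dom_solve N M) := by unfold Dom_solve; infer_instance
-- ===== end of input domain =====

-- B replaces A's two prefix-sets and set-difference by one growing set with a counter,
-- building each prefix string incrementally instead of re-joining a slice per prefix (measurably faster by a constant factor).

-- ===== PORT A =====
-- 'l is not ""' in CPython (interned empty string) behaves as 'l != ""'; ported as such.
def solve (N : List String) (M : List String) : Int :=
  let _N := N.foldl (fun s n =>
    let path := ((PySem.Str.split? n "/").getD []).filter (fun l => !(l == ""))
    (PySem.List.pyRange 1 ((path.length : Int) + 1) 1).foldl
      (fun s i => PySem.Set.add s (PySem.Str.join "/" (PySem.List.slice path none (some i)))) s)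
    PySem.Set.empty
  let _M := M.foldl (fun s m =>
    let path := ((PySem.Str.split? m "/").getD []).filter (fun l => !(l == ""))
    (PySem.List.pyRange 1 ((path.length : Int) + 1) 1).foldl
      (fun s i => PySem.Set.add s (PySem.Str.join "/" (PySem.List.slice path none (some i)))) s)
    PySem.Set.empty
  ((PySem.Set.diff _M _N).length : Int)

-- ===== PORT B =====
def solve_alt (N : List String) (M : List String) : Int :=
  let seen := N.foldl (fun s n =>
    (((PySem.Str.split? n "/").getD []).foldl
      (fun (st : PySem.Set String × String) p =>
        if p = "" then st
        else
          let cur := if st.2 = "" then p else st.2 ++ "/" ++ p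
          (PySem.Set.add st.1 cur, cur))
      (s, "")).1) PySem.Set.empty
  let r := M.foldl (fun (st : PySem.Set String × Int) m =>
    let r2 := ((PySem.Str.split? m "/").getD []).foldl
      (fun (t : (PySem.Set String × String) × Int) p =>
        if p = "" then t
        else
          let cur := if t.1.2 = "" then p else t.1.2 ++ "/" ++ p
          if t.1.1.contains cur then ((t.1.1, cur), t.2)
          else ((PySem.Set.add t.1.1 cur, cur), t.2 + 1))
      ((st.1, ""), st.2)
    (r2.1.1, r2.2)) (seen, 0)
  r.2

-- ===== PRECONDITION & SPEC =====
def Spec_solve (N : List String) (M : List String) (out : Int) : Prop := out = solve_alt N M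
instance (N : List String) (M : List String) (out : Int) : Decidable (Spec_solve N M out) := by unfold Spec_solve; infer_instance

-- ===== CLAIM (what is proved, stated in full; the proofs are below) =====
def Claim_equal_solve : Prop := ∀ (N : List String) (M : List String), Dom_solve N M → Spec_solve N M (solve N M)

-- ===== LEMMAS AND PROOFS =====

-- proof-side vocabulary
def pvParts (x : String) : List String :=
  ((PySem.Str.split? x "/").getD []).filter (fun l => !(l == ""))

def pvJ (l : List String) : String := PySem.Str.join "/" l

-- the non-empty prefix joins of a component list
def pvPreJ (ps : List String) : List String :=
  (List.range ps.length).map (fun i => pvJ (ps.take (i + 1)))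

-- the chain of 'cur' values B generates
def pvCurList : String → List String → List String
  | _, [] => []
  | cur, p :: ps =>
      let c := if cur = "" then p else cur ++ "/" ++ p
      c :: pvCurList c ps

def pvLastC : String → List String → String
  | cur, [] => cur
  | cur, p :: ps => pvLastC (if cur = "" then p else cur ++ "/" ++ p) ps

-- the generic "count the new elements" fold of B's second phase
def pvCnt (xs : List String) (st : PySem.Set String × Int) : PySem.Set String × Int :=
  xs.foldl (fun t x => if t.1.contains x then t else (PySem.Set.add t.1 x, t.2 + 1)) st

-- ---- string facts ----
lemma pvStr_ne_empty (a b : String) : a ++ "/" ++ b ≠ "" := by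
  intro h
  have : (a ++ "/" ++ b).toList = ("" : String).toList := by rw [h]
  simp at this

lemma pvJ_singleton (p : String) : pvJ [p] = p := by
  apply String.ext
  simp [pvJ, PySem.Chars.join_singleton]

lemma pvJ_cons (p : String) (l : List String) (hl : l ≠ []) :
    pvJ (p :: l) = p ++ "/" ++ pvJ l := by
  obtain ⟨q, t, rfl⟩ := List.exists_cons_of_ne_nil hl
  apply String.ext
  have h1 := PySem.Str.toList_join "/" (p :: q :: t)
  have h2 := PySem.Str.toList_join "/" (q :: t)
  simp only [List.map_cons] at h1 h2
  rw [PySem.Chars.join_cons_cons] at h1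
  show (pvJ (p :: q :: t)).toList = (p ++ "/" ++ pvJ (q :: t)).toList
  simp only [pvJ] at *
  rw [h1]
  simp [h2]

-- ---- A's inner loop = update with the prefix joins ----
lemma pvA_inner (ps : List String) (s : PySem.Set String) :
    (PySem.List.pyRange 1 ((ps.length : Int) + 1) 1).foldl
      (fun s i => PySem.Set.add s (PySem.Str.join "/" (PySem.List.slice ps none (some i)))) s
      = PySem.Set.update s (pvPreJ ps) := by
  rw [PySem.List.pyRange_one]
  have hb : ((ps.length : Int) + 1 - 1).toNat = ps.length := by omega
  rw [hb, List.foldl_map,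
    ← PySem.Set.update_map_eq_foldl_add (l := List.range ps.length)
      (f := fun k => PySem.Str.join "/" (PySem.List.slice ps none (some (1 + (k : Int)))))]
  unfold pvPreJ pvJ
  congr 1
  apply List.map_congr_left
  intro i _
  rw [PySem.List.slice_to ps (by omega : (0:Int) ≤ 1 + (i : Int))]
  congr 2
  omega

lemma pvFoldl_skip {β : Type} (l : List String) (f : β → String → β) (st : β) :
    l.foldl (fun st p => if p = "" then st else f st p) st
      = (l.filter (fun p => !(p == ""))).foldl f st := by
  induction l generalizing st with
  | nil => rfl
  | cons a t ih => by_cases h : a = "" <;> simp [h, ih]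

-- ---- B's first-phase inner loop ----
lemma pvB1 (ps : List String) (s : PySem.Set String) (cur : String) :
    ps.foldl (fun (st : PySem.Set String × String) p =>
        let c := if st.2 = "" then p else st.2 ++ "/" ++ p
        (PySem.Set.add st.1 c, c)) (s, cur)
      = (PySem.Set.update s (pvCurList cur ps), pvLastC cur ps) := by
  induction ps generalizing s cur with
  | nil => simp [pvCurList, pvLastC, PySem.Set.update_nil]
  | cons p t ih =>
      simp only [List.foldl_cons, pvCurList, pvLastC]
      rw [ih, PySem.Set.update_cons]

-- ---- the cur chain is exactly the prefix joins ----
lemma pvCurList_gen (ps : List String) (cur : String) (h : ∀ p ∈ ps, p ≠ "") :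
    pvCurList cur ps = (List.range ps.length).map
      (fun i => if cur = "" then pvJ (ps.take (i + 1)) else cur ++ "/" ++ pvJ (ps.take (i + 1))) := by
  induction ps generalizing cur with
  | nil => simp [pvCurList]
  | cons p t ih =>
      have hp : p ≠ "" := h p (List.mem_cons_self ..)
      have ht : ∀ q ∈ t, q ≠ "" := fun q hq => h q (List.mem_cons_of_mem _ hq)
      set c : String := if cur = "" then p else cur ++ "/" ++ p with hc
      have hcne : c ≠ "" := by
        rw [hc]; split
        · exact hp
        · exact pvStr_ne_empty cur p
      have hstep : pvCurList cur (p :: t) = c :: pvCurList c t := by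
        simp [pvCurList, hc]
      rw [hstep, ih c ht]
      simp only [List.length_cons]
      rw [List.range_succ_eq_map]
      simp only [List.map_cons, List.map_map]
      congr 1
      · -- head
        simp only [List.take_succ_cons, List.take_zero, pvJ_singleton, hc]
      · -- tail
        apply List.map_congr_left
        intro i hi
        have hlt : i < t.length := List.mem_range.mp hi
        have hpos : 0 < (t.take (i + 1)).length := by
          rw [List.length_take]; omega
        have htake : t.take (i + 1) ≠ [] := List.ne_nil_of_length_pos hpos
        simp only [Function.comp, Nat.succ_eq_add_one, List.take_succ_cons]
        rw [pvJ_cons p _ htake, if_neg hcne]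
        by_cases hcur : cur = ""
        · rw [if_pos hcur, hc, if_pos hcur]
        · rw [if_neg hcur, hc, if_neg hcur]
          apply String.ext
          simp

lemma pvCurList_preJ (ps : List String) (h : ∀ p ∈ ps, p ≠ "") :
    pvCurList "" ps = pvPreJ ps := by
  rw [pvCurList_gen ps "" h]
  simp [pvPreJ]

lemma pvParts_ne (x : String) : ∀ p ∈ pvParts x, p ≠ "" := by
  intro p hp
  unfold pvParts at hp
  have := List.of_mem_filter hp
  simpa using this

-- ---- flatten the outer phase-1 loops ----
def pvAll (L : List String) : List String := L.flatMap (fun n => pvPreJ (pvParts n))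

lemma pvOuter1 (L : List String) (s : PySem.Set String) :
    L.foldl (fun s n => PySem.Set.update s (pvPreJ (pvParts n))) s
      = PySem.Set.update s (pvAll L) := by
  induction L generalizing s with
  | nil => simp [pvAll, PySem.Set.update_nil]
  | cons a t ih =>
      simp only [List.foldl_cons, pvAll, List.flatMap_cons]
      rw [ih, PySem.Set.update_append]
      rfl

-- ---- B's second-phase inner loop is the counting fold over the cur chain ----
lemma pvB2 (ps : List String) (s : PySem.Set String) (cur : String) (c : Int) :
    ps.foldl (fun (t : (PySem.Set String × String) × Int) p =>
        let cu := if t.1.2 = "" then p else t.1.2 ++ "/" ++ p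
        if t.1.1.contains cu then ((t.1.1, cu), t.2)
        else ((PySem.Set.add t.1.1 cu, cu), t.2 + 1)) ((s, cur), c)
      = ((( pvCnt (pvCurList cur ps) (s, c)).1, pvLastC cur ps), (pvCnt (pvCurList cur ps) (s, c)).2) := by
  induction ps generalizing s cur c with
  | nil => simp [pvCurList, pvLastC, pvCnt]
  | cons p t ih =>
      simp only [List.foldl_cons, pvCurList, pvLastC, pvCnt, List.foldl_cons]
      by_cases hc : (PySem.Set.contains s (if cur = "" then p else cur ++ "/" ++ p)) = true
      · simp only [hc, if_true]
        exact ih ..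
      · simp only [Bool.not_eq_true] at hc
        simp only [hc, Bool.false_eq_true, if_false]
        exact ih ..

-- ---- counting fold = update + cardinality difference ----
lemma pvCnt_spec (xs : List String) (s : PySem.Set String) (c : Int) (hs : s.Nodup) :
    pvCnt xs (s, c)
      = (PySem.Set.update s xs, c + ((PySem.Set.update s xs).length : Int) - (s.length : Int)) := by
  induction xs generalizing s c with
  | nil => simp [pvCnt, PySem.Set.update_nil]
  | cons x t ih =>
      simp only [pvCnt, List.foldl_cons, PySem.Set.update_cons]
      by_cases hx : x ∈ s
      · rw [if_pos (by exact (PySem.Set.contains_iff s x).mpr hx)]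
        rw [PySem.Set.add_of_mem hx]
        exact ih s c hs
      · rw [if_neg (by simp [hx])]
        have h1 : PySem.Set.add s x = s ++ [x] := PySem.Set.add_of_not_mem hx
        have hnd : (PySem.Set.add s x).Nodup := PySem.Set.nodup_add _ _ hs
        have := ih (PySem.Set.add s x) (c + 1) hnd
        unfold pvCnt at this
        rw [this]
        have hlen : (PySem.Set.add s x).length = s.length + 1 := by rw [h1]; simp
        refine congrArg (Prod.mk _) ?_
        simp only [hlen]
        push_cast
        ring

-- ---- cardinalities via Finsets ----
lemma pvLen_update (xs : List String) (s : PySem.Set String) (hs : s.Nodup) :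
    ((PySem.Set.update s xs).length : Int)
      = (s.length : Int) + ((xs.toFinset \ s.toFinset).card : Int) := by
  induction xs generalizing s with
  | nil => simp [PySem.Set.update_nil]
  | cons x t ih =>
      rw [PySem.Set.update_cons]
      by_cases hx : x ∈ s
      · rw [PySem.Set.add_of_mem hx, ih s hs]
        have : (x :: t).toFinset \ s.toFinset = t.toFinset \ s.toFinset := by
          simp only [List.toFinset_cons]
          exact Finset.insert_sdiff_of_mem _ (List.mem_toFinset.mpr hx)
        rw [this]
      · have h1 : PySem.Set.add s x = s ++ [x] := PySem.Set.add_of_not_mem hx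
        have hnd : (PySem.Set.add s x).Nodup := PySem.Set.nodup_add _ _ hs
        rw [ih _ hnd]
        have hlen : (PySem.Set.add s x).length = s.length + 1 := by rw [h1]; simp
        have hsf : (PySem.Set.add s x).toFinset = insert x s.toFinset := by
          rw [h1]; ext y; simp
        rw [hlen, hsf]
        have hxs : x ∉ s.toFinset := by simpa using hx
        have key : ((x :: t).toFinset \ s.toFinset).card
            = (t.toFinset \ insert x s.toFinset).card + 1 := by
          simp only [List.toFinset_cons]
          rw [Finset.insert_sdiff_of_notMem _ hxs, Finset.sdiff_insert]
          by_cases hxt : x ∈ t.toFinset \ s.toFinset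
          · rw [Finset.insert_eq_self.2 hxt, Finset.card_erase_of_mem hxt]
            have : 0 < (t.toFinset \ s.toFinset).card := Finset.card_pos.mpr ⟨x, hxt⟩
            omega
          · rw [Finset.erase_eq_of_notMem hxt, Finset.card_insert_of_notMem hxt]
        rw [key]
        push_cast
        ring

lemma pvToFinset_ofList (xs : List String) :
    (PySem.Set.ofList xs).toFinset = xs.toFinset := by
  ext y; simp [List.mem_toFinset, PySem.Set.mem_ofList]

lemma pvLen_diff (xs : List String) (s : PySem.Set String) :
    ((PySem.Set.diff (PySem.Set.ofList xs) s).length : Int)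
      = ((xs.toFinset \ s.toFinset).card : Int) := by
  have hnd : (PySem.Set.diff (PySem.Set.ofList xs) s).Nodup :=
    PySem.Set.nodup_diff _ _ (PySem.Set.nodup_ofList xs)
  have hf : (PySem.Set.diff (PySem.Set.ofList xs) s).toFinset = xs.toFinset \ s.toFinset := by
    ext y
    simp [List.mem_toFinset, PySem.Set.mem_diff, PySem.Set.mem_ofList, Finset.mem_sdiff]
  have hcard := List.toFinset_card_of_nodup hnd
  rw [hf] at hcard
  exact_mod_cast hcard.symm

-- ---- the two sides ----
lemma pvSolve_eq (N M : List String) :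
    solve N M = (((pvAll M).toFinset \ (pvAll N).toFinset).card : Int) := by
  unfold solve
  simp only []
  have hN : N.foldl (fun s n =>
      let path := ((PySem.Str.split? n "/").getD []).filter (fun l => !(l == ""))
      (PySem.List.pyRange 1 ((path.length : Int) + 1) 1).foldl
        (fun s i => PySem.Set.add s (PySem.Str.join "/" (PySem.List.slice path none (some i)))) s)
      PySem.Set.empty = PySem.Set.ofList (pvAll N) := by
    have : ∀ (s : PySem.Set String), N.foldl (fun s n =>
        let path := ((PySem.Str.split? n "/").getD []).filter (fun l => !(l == ""))
        (PySem.List.pyRange 1 ((path.length : Int) + 1) 1).foldl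
          (fun s i => PySem.Set.add s (PySem.Str.join "/" (PySem.List.slice path none (some i)))) s)
        s = PySem.Set.update s (pvAll N) := by
      intro s
      rw [← pvOuter1]
      apply PySem.List.foldl_congr_mem
      intro acc n _
      exact pvA_inner (pvParts n) acc
    rw [this PySem.Set.empty, PySem.Set.update_empty]
  have hM : ∀ (s : PySem.Set String), M.foldl (fun s m =>
      let path := ((PySem.Str.split? m "/").getD []).filter (fun l => !(l == ""))
      (PySem.List.pyRange 1 ((path.length : Int) + 1) 1).foldl
        (fun s i => PySem.Set.add s (PySem.Str.join "/" (PySem.List.slice path none (some i)))) s)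
      s = PySem.Set.update s (pvAll M) := by
    intro s
    rw [← pvOuter1]
    apply PySem.List.foldl_congr_mem
    intro acc m _
    exact pvA_inner (pvParts m) acc
  rw [hN, hM PySem.Set.empty, PySem.Set.update_empty]
  rw [pvLen_diff, pvToFinset_ofList]

-- named, fully reduced forms of B's loop bodies (proof-side only; definitionally equal to the port's lambdas)
def pvF1 : PySem.Set String × String → String → PySem.Set String × String :=
  fun st p =>
    if p = "" then st
    else (PySem.Set.add st.1 (if st.2 = "" then p else st.2 ++ "/" ++ p),
          if st.2 = "" then p else st.2 ++ "/" ++ p)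

def pvF2 : (PySem.Set String × String) × Int → String → (PySem.Set String × String) × Int :=
  fun t p =>
    if p = "" then t
    else
      if t.1.1.contains (if t.1.2 = "" then p else t.1.2 ++ "/" ++ p) then
        ((t.1.1, if t.1.2 = "" then p else t.1.2 ++ "/" ++ p), t.2)
      else ((PySem.Set.add t.1.1 (if t.1.2 = "" then p else t.1.2 ++ "/" ++ p),
             if t.1.2 = "" then p else t.1.2 ++ "/" ++ p), t.2 + 1)

def pvG1 (s : PySem.Set String) (n : String) : PySem.Set String :=
  (((PySem.Str.split? n "/").getD []).foldl pvF1 (s, "")).1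

def pvG2 (st : PySem.Set String × Int) (m : String) : PySem.Set String × Int :=
  ((((PySem.Str.split? m "/").getD []).foldl pvF2 ((st.1, ""), st.2)).1.1,
   (((PySem.Str.split? m "/").getD []).foldl pvF2 ((st.1, ""), st.2)).2)

lemma pvG1_eq (s : PySem.Set String) (n : String) :
    pvG1 s n = PySem.Set.update s (pvPreJ (pvParts n)) := by
  unfold pvG1 pvF1
  rw [pvFoldl_skip]
  have hb := pvB1 (pvParts n) s ""
  rw [pvCurList_preJ _ (pvParts_ne n)] at hb
  exact congrArg (fun (z : PySem.Set String × String) => z.1) hb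

lemma pvG2_eq (st : PySem.Set String × Int) (m : String) :
    pvG2 st m = pvCnt (pvPreJ (pvParts m)) st := by
  unfold pvG2 pvF2
  rw [pvFoldl_skip]
  have hb := pvB2 (pvParts m) st.1 "" st.2
  rw [pvCurList_preJ _ (pvParts_ne m)] at hb
  exact congrArg (fun (z : (PySem.Set String × String) × Int) =>
    ((z.1.1, z.2) : PySem.Set String × Int)) hb

lemma pvGen1 (L : List String) (s : PySem.Set String) :
    L.foldl pvG1 s = PySem.Set.update s (pvAll L) := by
  induction L generalizing s with
  | nil => simp [pvAll, PySem.Set.update_nil]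
  | cons a t ih =>
      simp only [List.foldl_cons, pvAll, List.flatMap_cons]
      rw [pvG1_eq, ih, PySem.Set.update_append]
      rfl

lemma pvGen2 (L : List String) (st : PySem.Set String × Int) :
    L.foldl pvG2 st = pvCnt (L.flatMap (fun m => pvPreJ (pvParts m))) st := by
  induction L generalizing st with
  | nil => rfl
  | cons a t ih =>
      simp only [List.foldl_cons, List.flatMap_cons]
      rw [pvG2_eq, ih]
      simp [pvCnt, List.foldl_append]

lemma pvSolveAlt_eq (N M : List String) :
    solve_alt N M = (((pvAll M).toFinset \ (pvAll N).toFinset).card : Int) := by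
  unfold solve_alt
  show (M.foldl pvG2 (N.foldl pvG1 PySem.Set.empty, 0)).2
      = (((pvAll M).toFinset \ (pvAll N).toFinset).card : Int)
  rw [pvGen1, PySem.Set.update_empty, pvGen2]
  rw [show (M.flatMap fun m => pvPreJ (pvParts m)) = pvAll M from rfl]
  rw [pvCnt_spec _ _ _ (PySem.Set.nodup_ofList (pvAll N))]
  show (0 : Int) + ((PySem.Set.update (PySem.Set.ofList (pvAll N)) (pvAll M)).length : Int)
      - ((PySem.Set.ofList (pvAll N)).length : Int) = _
  rw [pvLen_update _ _ (PySem.Set.nodup_ofList (pvAll N)), pvToFinset_ofList]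
  ring

-- ===== VERDICT (by name: the statement is the Claim_ definition above) =====
theorem solve_spec : Claim_equal_solve := by
  intro N M _
  unfold Spec_solve
  rw [pvSolve_eq, pvSolveAlt_eq]
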